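-- pv_equiv track=rewrite | github.com/aaronjenson/yoshai | data.py | expand_dir_tree
-- ===== SOURCE A (Python) =====
-- def expand_dir_tree(dirs: list[list[str]], path: str | list[str] = 'data'):
--     if not isinstance(path, list):
--         path = list([path])
--     paths = []
--
--     if len(dirs) != 0:
--         for d in dirs[0]:
--             path.append(d)
--             paths.extend(expand_dir_tree(dirs[1:], path))
--             path.pop()
--     else:
--         paths.append(list(path))
--
--     return paths
-- ===== SOURCE B (Python) =====
-- def expand_dir_tree(dirs: list[list[str]], path: str | list[str] = 'data'):
--     if not isinstance(path, list):
--         path = list([path])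
--     paths = [list(path)]
--     for level in dirs:
--         paths = [p + [d] for p in paths for d in level]
--     return paths
-- ===== Notes on version B (the rewrite author's own statement) =====
-- stated objective: idiomatic
-- what changed: Replaces the recursive backtracking over dirs[0]/dirs[1:] with a mutating shared path by an iterative layer-by-layer Cartesian-product build: start from [path] and extend every partial path by each entry of the next level.
import Mathlib
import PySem

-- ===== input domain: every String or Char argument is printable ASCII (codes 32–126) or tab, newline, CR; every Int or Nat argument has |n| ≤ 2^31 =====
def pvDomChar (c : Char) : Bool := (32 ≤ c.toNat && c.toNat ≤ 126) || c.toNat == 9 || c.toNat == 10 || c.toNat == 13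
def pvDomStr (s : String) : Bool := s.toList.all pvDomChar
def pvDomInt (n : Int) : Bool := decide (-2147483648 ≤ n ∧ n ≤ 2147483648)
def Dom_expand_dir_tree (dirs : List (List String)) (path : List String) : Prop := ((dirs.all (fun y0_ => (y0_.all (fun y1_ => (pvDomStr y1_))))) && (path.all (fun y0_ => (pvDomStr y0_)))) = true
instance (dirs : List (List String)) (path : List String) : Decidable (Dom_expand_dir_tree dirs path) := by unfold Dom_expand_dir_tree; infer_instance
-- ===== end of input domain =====

-- B builds the Cartesian product iteratively level by level instead of A's recursive
-- backtracking; same values, no speed claim. A mutates its `path` argument during the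
-- recursion but restores it before returning; the equivalence here is about the return value.

-- ===== PORT A =====
-- recursion on dirs: for d in dirs[0]: paths.extend(expand_dir_tree(dirs[1:], path ++ [d]))
def expand_dir_tree : List (List String) → List String → List (List String)
  | [], path => [path]
  | l :: rest, path => l.foldl (fun paths d => paths ++ expand_dir_tree rest (path ++ [d])) []

-- ===== PORT B =====
-- paths = [path]; for level in dirs: paths = [p + [d] for p in paths for d in level]
def expand_dir_tree_alt (dirs : List (List String)) (path : List String) : List (List String) :=
  dirs.foldl (fun paths level => paths.flatMap (fun p => level.map (fun d => p ++ [d]))) [path]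

-- ===== PRECONDITION & SPEC =====
def Spec_expand_dir_tree (dirs : List (List String)) (path : List String) (out : List (List String)) : Prop := out = expand_dir_tree_alt dirs path
instance (dirs : List (List String)) (path : List String) (out : List (List String)) : Decidable (Spec_expand_dir_tree dirs path out) := by unfold Spec_expand_dir_tree; infer_instance

-- ===== CLAIM (what is proved, stated in full; the proofs are below) =====
def Claim_equal_expand_dir_tree : Prop := ∀ (dirs : List (List String)) (path : List String), Dom_expand_dir_tree dirs path → Spec_expand_dir_tree dirs path (expand_dir_tree dirs path)

-- ===== LEMMAS AND PROOFS =====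

-- B's fold starting from any accumulator splits into a flatMap of folds from singletons.
theorem foldl_levels_split (rest : List (List String)) (acc : List (List String)) :
    rest.foldl (fun paths level => paths.flatMap (fun p => level.map (fun d => p ++ [d]))) acc
      = acc.flatMap (fun c =>
          rest.foldl (fun paths level => paths.flatMap (fun p => level.map (fun d => p ++ [d]))) [c]) := by
  induction rest generalizing acc with
  | nil => simp
  | cons l r ih =>
    simp only [List.foldl_cons]
    rw [ih]
    have hr : (fun c : List String =>
        List.foldl (fun paths level => paths.flatMap (fun p => level.map (fun d => p ++ [d])))
          ([c].flatMap (fun p => l.map (fun d => p ++ [d]))) r)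
        = fun c => ([c].flatMap (fun p => l.map (fun d => p ++ [d]))).flatMap (fun c' =>
            List.foldl (fun paths level => paths.flatMap (fun p => level.map (fun d => p ++ [d]))) [c'] r) :=
      funext fun c => ih _
    rw [hr]
    simp [List.flatMap_assoc]

theorem expand_eq (dirs : List (List String)) (path : List String) :
    expand_dir_tree dirs path = expand_dir_tree_alt dirs path := by
  induction dirs generalizing path with
  | nil => simp [expand_dir_tree, expand_dir_tree_alt]
  | cons l rest ih =>
    simp only [expand_dir_tree, expand_dir_tree_alt, List.foldl_cons]
    rw [PySem.List.foldl_append_eq_flatMap, List.nil_append, foldl_levels_split]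
    simp only [expand_dir_tree_alt] at ih
    simp [List.flatMap_map, ih]

-- ===== VERDICT (by name: the statement is the Claim_ definition above) =====
theorem expand_dir_tree_spec : Claim_equal_expand_dir_tree := by
  intro dirs path _
  exact expand_eq dirs path
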